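-- pv_equiv track=rewrite | github.com/marsggbo/hyperbox | hyperbox_app/medmnist/datamodules/utils.py | undersample
-- ===== SOURCE A (Python) =====
-- def undersample(slices, threshold=64):
--     tmp = []
--     original_num = len(slices)
--     add_idxs = []
--     remain_num = threshold
--     interval = original_num // remain_num
--     idx = original_num // 2 if original_num%2==1 else original_num//2 -1
--     remain_list = [idx]
--     count = 1
--     flag = 'right'
--     while len(remain_list) < remain_num:
--         if flag == 'right':
--             idx = idx + count * interval
--             flag = 'left'
--         elif flag == 'left':
--             idx = idx - count * interval
--             flag = 'right'
--         count += 1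
--         remain_list.append(idx)
--     add_idxs.extend(remain_list)
--     for idx in sorted(add_idxs):
--         tmp.append(slices[idx])
--     return tmp
-- ===== SOURCE B (Python) =====
-- def undersample(slices, threshold=64):
--     original_num = len(slices)
--     interval = original_num // threshold
--     center = original_num // 2 if original_num % 2 == 1 else original_num // 2 - 1
--     kmax = threshold // 2
--     kmin = kmax - (threshold - 1)
--     return [slices[center + k * interval] for k in range(kmin, kmax + 1)]
-- ===== Notes on version B (the rewrite author's own statement) =====
-- stated objective: simpler
-- what changed: Replaced A's iterative ping-pong accumulation of indices followed by a sort with a direct closed-form arithmetic index sequence slices[center + k*interval] for k in range(kmin, kmax+1).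
-- outside the precondition, e.g. on undersample([1, 2, 3], -1): A returns [2], B returns []; on undersample([1, 2, 3], 0): A raises ZeroDivisionError, B raises ZeroDivisionError; on undersample([], 5): A raises IndexError, B raises IndexError
import Mathlib
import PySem

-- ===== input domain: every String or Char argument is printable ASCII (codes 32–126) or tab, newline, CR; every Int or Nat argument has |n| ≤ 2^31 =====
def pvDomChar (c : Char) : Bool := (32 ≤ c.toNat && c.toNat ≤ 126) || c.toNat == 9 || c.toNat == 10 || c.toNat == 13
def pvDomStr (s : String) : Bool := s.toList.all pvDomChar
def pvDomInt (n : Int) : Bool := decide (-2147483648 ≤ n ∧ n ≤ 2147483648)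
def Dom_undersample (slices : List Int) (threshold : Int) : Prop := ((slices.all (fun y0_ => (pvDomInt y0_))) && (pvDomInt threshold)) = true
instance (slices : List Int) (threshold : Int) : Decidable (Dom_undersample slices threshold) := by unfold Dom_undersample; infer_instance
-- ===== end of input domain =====

-- B replaces A's ping-pong index accumulation + sort by the closed-form arithmetic
-- sequence of indices center + k*interval, k = kmin..kmax (objective: simpler).

-- ===== PORT A =====
-- the while-loop of A: state (idx, remain_list, count, flag); terminates because every
-- iteration appends one element to remain_list
def pingPong (remain_num interval : Int) (idx : Int) (remain_list : List Int)
    (count : Int) (flag : String) : List Int :=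
  if (remain_list.length : Int) < remain_num then
    if flag = "right" then
      pingPong remain_num interval (idx + count * interval)
        (remain_list ++ [idx + count * interval]) (count + 1) "left"
    else if flag = "left" then
      pingPong remain_num interval (idx - count * interval)
        (remain_list ++ [idx - count * interval]) (count + 1) "right"
    else
      pingPong remain_num interval idx (remain_list ++ [idx]) (count + 1) flag
  else remain_list
termination_by (remain_num - remain_list.length).toNat
decreasing_by all_goals · simp only [List.length_append, List.length_cons, List.length_nil]; omega

def undersample (slices : List Int) (threshold : Int) : List Int :=
  let original_num : Int := slices.length
  let remain_num : Int := threshold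
  let interval : Int := PySem.Int.floordiv original_num remain_num
  let idx : Int := if PySem.Int.mod original_num 2 = 1 then PySem.Int.floordiv original_num 2
                   else PySem.Int.floordiv original_num 2 - 1
  let remain_list : List Int := pingPong remain_num interval idx [idx] 1 "right"
  let add_idxs : List Int := remain_list
  -- for idx in sorted(add_idxs): tmp.append(slices[idx])   (Pre_ guarantees the index is in range)
  (PySem.List.sorted add_idxs (fun x => x) false).foldl
    (fun tmp i => tmp ++ [(PySem.List.pyGet? slices i).getD 0]) []

-- ===== PORT B =====
def undersample_alt (slices : List Int) (threshold : Int) : List Int :=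
  let original_num : Int := slices.length
  let interval : Int := PySem.Int.floordiv original_num threshold
  let center : Int := if PySem.Int.mod original_num 2 = 1 then PySem.Int.floordiv original_num 2
                      else PySem.Int.floordiv original_num 2 - 1
  let kmax : Int := PySem.Int.floordiv threshold 2
  let kmin : Int := kmax - (threshold - 1)
  (PySem.List.pyRange kmin (kmax + 1) 1).map
    (fun k => (PySem.List.pyGet? slices (center + k * interval)).getD 0)

-- ===== PRECONDITION & SPEC =====
-- Pre_ excludes inputs on which the Python A does not return an ordinary value or the corner is
-- unspecified: threshold == 0 raises ZeroDivisionError, empty slices raise IndexError, and for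
-- negative threshold the request for a non-positive number of slices has no specified answer
-- (A happens to return the single center slice, B returns no slices; both are defensible).
def Pre_undersample (slices : List Int) (threshold : Int) : Prop :=
  1 ≤ threshold ∧ slices ≠ []
instance (slices : List Int) (threshold : Int) : Decidable (Pre_undersample slices threshold) := by
  unfold Pre_undersample; infer_instance

def pvWitness_undersample : List Int × Int := ([10, 20, 30, 40, 50], 3)

def Spec_undersample (slices : List Int) (threshold : Int) (out : List Int) : Prop := out = undersample_alt slices threshold
instance (slices : List Int) (threshold : Int) (out : List Int) : Decidable (Spec_undersample slices threshold out) := by unfold Spec_undersample; infer_instance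

-- ===== CLAIM (what is proved, stated in full; the proofs are below) =====
def Claim_equal_undersample : Prop := ∀ (slices : List Int) (threshold : Int), Dom_undersample slices threshold → Pre_undersample slices threshold → Spec_undersample slices threshold (undersample slices threshold)

-- ===== LEMMAS AND PROOFS =====

-- the future appends produced by the loop from a "right" (b = true) / "left" (b = false)
-- state at ping-pong level m, with j iterations left
def zz (c i : Int) : Int → Nat → Bool → List Int
  | _, 0, _ => []
  | m, j+1, true  => (c + m * i) :: zz c i m j false
  | m, j+1, false => (c - m * i) :: zz c i (m + 1) j true

lemma pp_zz : ∀ (j : Nat) (t i c m : Int) (acc : List Int), (t - acc.length).toNat = j →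
    (pingPong t i (c - (m - 1) * i) acc (2 * m - 1) "right" = acc ++ zz c i m j true)
    ∧ (pingPong t i (c + m * i) acc (2 * m) "left" = acc ++ zz c i m j false) := by
  intro j
  induction j with
  | zero =>
    intro t i c m acc h
    have hge : ¬ ((acc.length : Int) < t) := by omega
    constructor <;> · rw [pingPong]; simp [hge, zz]
  | succ j ih =>
    intro t i c m acc h
    have hlt : ((acc.length : Int) < t) := by omega
    constructor
    · rw [pingPong]
      simp only [hlt, if_pos]
      have e1 : c - (m - 1) * i + (2 * m - 1) * i = c + m * i := by ring
      rw [e1]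
      have hlen : (t - ((acc ++ [c + m * i]).length : Int)).toNat = j := by
        simp only [List.length_append, List.length_cons, List.length_nil]; omega
      have := (ih t i c m (acc ++ [c + m * i]) hlen).2
      have e2 : 2 * m - 1 + 1 = 2 * m := by ring
      rw [e2, this, zz]
      simp
    · rw [pingPong]
      have hne : ("left" : String) ≠ "right" := by decide
      simp only [hlt, if_pos, hne, reduceIte]
      have e1 : c + m * i - 2 * m * i = c - ((m + 1) - 1) * i := by ring
      have hlen : (t - ((acc ++ [c + m * i - 2 * m * i]).length : Int)).toNat = j := by
        simp only [List.length_append, List.length_cons, List.length_nil]; omega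
      have key := (ih t i c (m + 1) (acc ++ [c + m * i - 2 * m * i]) hlen).1
      rw [(by ring : c - ((m + 1) - 1) * i = c + m * i - 2 * m * i),
          (by ring : 2 * (m + 1) - 1 = 2 * m + 1)] at key
      rw [key, zz]
      simp [(by ring : c - m * i = c + m * i - 2 * m * i)]

lemma zz_perm (c i : Int) : ∀ (j : Nat) (m : Int),
    (zz c i m j true).Perm
      (((PySem.List.pyRange m (m + ((j+1)/2 : Nat)) 1).map (fun k => c + k * i)) ++
       ((PySem.List.pyRange m (m + ((j/2 : Nat)) ) 1).map (fun k => c - k * i))) := by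
  intro j
  induction j using Nat.twoStepInduction with
  | zero =>
    intro m
    simp [zz]
  | one =>
    intro m
    have h1 : PySem.List.pyRange m (m + (((1+1)/2 : Nat) : Int)) 1 = [m] := by
      norm_num [PySem.List.pyRange_one_singleton]
    have h2 : PySem.List.pyRange m (m + (((1/2 : Nat)) : Int)) 1 = [] := by
      exact PySem.List.pyRange_one_eq_nil (by norm_num)
    rw [h1, h2]; simp [zz]
  | more j ih =>
    intro m
    have hz : zz c i m (j+2) true = (c + m * i) :: (c - m * i) :: zz c i (m + 1) j true := by
      simp [zz]
    rw [hz]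
    have hp : ((j+2+1)/2 : Nat) = ((j+1)/2 : Nat) + 1 := by omega
    have hq : ((j+2)/2 : Nat) = (j/2 : Nat) + 1 := by omega
    rw [hp, hq]
    have hpos : PySem.List.pyRange m (m + (((j+1)/2 + 1 : Nat) : Int)) 1
        = m :: PySem.List.pyRange (m+1) (m + (((j+1)/2 + 1 : Nat) : Int)) 1 :=
      PySem.List.pyRange_one_cons (by push_cast; omega)
    have hneg : PySem.List.pyRange m (m + (((j/2 + 1 : Nat)) : Int)) 1
        = m :: PySem.List.pyRange (m+1) (m + (((j/2 + 1 : Nat)) : Int)) 1 :=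
      PySem.List.pyRange_one_cons (by push_cast; omega)
    rw [hpos, hneg]
    have e1 : m + (((j+1)/2 + 1 : Nat) : Int) = (m+1) + (((j+1)/2 : Nat) : Int) := by push_cast; ring
    have e2 : m + (((j/2 + 1 : Nat)) : Int) = (m+1) + (((j/2 : Nat)) : Int) := by push_cast; ring
    rw [e1, e2]
    simp only [List.map_cons, List.cons_append]
    refine List.Perm.cons _ ?_
    refine ((ih (m+1)).cons _).trans ?_
    exact (List.perm_middle).symm

-- the negated range: map (·* -1)ish perm between [1..q] negated and [-q..-1]
lemma neg_range_perm (q : Nat) :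
    ((PySem.List.pyRange 1 (1 + (q:Int)) 1).map (fun k => -k)).Perm
      (PySem.List.pyRange (-(q:Int)) 0 1) := by
  induction q with
  | zero => simp
  | succ q ih =>
    rw [(by push_cast; ring : (1 : Int) + ((q+1 : Nat) : Int) = (1 + (q:Int)) + 1)]
    have h1 : PySem.List.pyRange 1 ((1 + (q:Int)) + 1) 1
        = PySem.List.pyRange 1 (1 + (q:Int)) 1 ++ [1 + (q:Int)] :=
      PySem.List.pyRange_one_succ_right (by omega)
    have h2 : PySem.List.pyRange (-((q+1:Nat):Int)) 0 1
        = (-((q+1:Nat):Int)) :: PySem.List.pyRange (-((q+1:Nat):Int) + 1) 0 1 :=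
      PySem.List.pyRange_one_cons (by push_cast; omega)
    rw [h1, h2]
    have e : -((q+1:Nat):Int) + 1 = -(q:Int) := by push_cast; ring
    rw [e]
    simp only [List.map_append, List.map_cons, List.map_nil]
    have he : -(1 + (q:Int)) = -((q+1:Nat):Int) := by push_cast; ring
    rw [he]
    refine List.Perm.trans (List.perm_append_comm) ?_
    exact List.Perm.cons _ ih

-- foldl-append is map
lemma foldl_append_map (g : Int → Int) : ∀ (L : List Int) (acc : List Int),
    L.foldl (fun tmp i => tmp ++ [g i]) acc = acc ++ L.map g := by
  intro L
  induction L with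
  | nil => intro acc; simp
  | cons x xs ih => intro acc; simp [List.foldl_cons, ih, List.append_assoc]

-- main: the sorted remain_list is the ascending arithmetic index sequence
lemma sorted_remain (t i c : Int) (ht : 1 ≤ t) (hi : 0 ≤ i) :
    PySem.List.sorted (pingPong t i c [c] 1 "right") (fun x => x) false
      = (PySem.List.pyRange (PySem.Int.floordiv t 2 - (t - 1)) (PySem.Int.floordiv t 2 + 1) 1).map
          (fun k => c + k * i) := by
  have hkmax : PySem.Int.floordiv t 2 = t / 2 := PySem.Int.floordiv_eq_ediv_of_pos (by omega)
  rw [hkmax]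
  have hR : pingPong t i c [c] 1 "right" = [c] ++ zz c i 1 (t-1).toNat true := by
    have h := (pp_zz (t-1).toNat t i c 1 [c] (by simp)).1
    rw [(by ring : c - (1 - 1) * i = c), (by norm_num : (2 : Int) * 1 - 1 = 1)] at h
    exact h
  have hp : (1 : Int) + ((((t-1).toNat + 1)/2 : Nat) : Int) = t / 2 + 1 := by omega
  have hq : -(((t-1).toNat/2 : Nat) : Int) = t / 2 - (t - 1) := by omega
  have hzz := zz_perm c i (t-1).toNat 1
  rw [hp] at hzz
  have hN : ((PySem.List.pyRange 1 (1 + (((t-1).toNat/2 : Nat) : Int)) 1).map (fun k => c - k * i)).Perm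
      ((PySem.List.pyRange (t / 2 - (t - 1)) 0 1).map (fun k => c + k * i)) := by
    have h1 : (fun k : Int => c - k * i) = (fun k : Int => c + k * i) ∘ (fun k : Int => -k) := by
      funext k; simp; ring
    rw [h1, ← List.map_map]
    refine List.Perm.map _ ?_
    rw [← hq]
    exact neg_range_perm _
  have hsplit : PySem.List.pyRange (t/2 - (t-1)) (t/2 + 1) 1
      = PySem.List.pyRange (t/2 - (t-1)) 0 1 ++ (0 :: PySem.List.pyRange 1 (t/2 + 1) 1) := by
    rw [PySem.List.pyRange_one_append _ 0 _ (by omega) (by omega),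
        PySem.List.pyRange_one_cons (by omega : (0:Int) < t/2 + 1)]
    norm_num
  have hperm : ((PySem.List.pyRange (t/2 - (t-1)) (t/2 + 1) 1).map (fun k => c + k * i)).Perm
      (pingPong t i c [c] 1 "right") := by
    rw [hR, hsplit]
    simp only [List.map_append, List.map_cons]
    have hc0 : c + 0 * i = c := by ring
    rw [hc0]
    refine List.Perm.trans ?_ (List.Perm.append_left [c] hzz.symm)
    refine List.Perm.trans (List.perm_append_comm) ?_
    simp only [List.cons_append, List.nil_append]
    exact List.Perm.cons _ (List.Perm.append_left _ hN.symm)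
  have hpair : (((PySem.List.pyRange (t/2 - (t-1)) (t/2 + 1) 1).map (fun k => c + k * i)).Pairwise (· ≤ ·)) := by
    refine List.Pairwise.map _ ?_ (PySem.List.pairwise_lt_pyRange_one _ _)
    intro a b hab
    have h2 : a * i ≤ b * i := mul_le_mul_of_nonneg_right hab.le hi
    linarith
  exact PySem.List.sorted_id_eq_of_perm_of_pairwise _ _ hperm hpair

-- ===== VERDICT (by name: the statement is the Claim_ definition above) =====
theorem undersample_spec : Claim_equal_undersample := by
  intro slices threshold hdom hpre
  obtain ⟨ht, hne⟩ := hpre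
  unfold Spec_undersample undersample undersample_alt
  simp only []
  have hi : 0 ≤ PySem.Int.floordiv (slices.length : Int) threshold := by
    rw [PySem.Int.floordiv_eq_ediv_of_pos (by omega)]
    exact Int.ediv_nonneg (by positivity) (by omega)
  rw [sorted_remain threshold _ _ ht hi, foldl_append_map]
  simp [List.map_map, Function.comp]
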